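-- pv_equiv track=rewrite | github.com/AnaOrozco122002/online_sensor_backend | server.py | _mode_with_null
-- ===== SOURCE A (Python) =====
-- def _is_nullish(v) -> bool:
--     if v is None: return True
--     s = str(v).strip().lower()
--     return s in ("", "null", "none", "na", "sin prediccion")
--
-- def _mode_with_null(labels):
--     """Devuelve (winner_or_None, counts_dict_including_None).
--     Empate: se prefiere una etiqueta NO nula."""
--     counts = {}
--     for lab in labels:
--         key = None if _is_nullish(lab) else str(lab).strip()
--         counts[key] = counts.get(key, 0) + 1
--
--     if not counts:
--         return None, {}
--
--     winner, maxc = None, -1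
--     for k, c in counts.items():
--         if c > maxc:
--             winner, maxc = k, c
--         elif c == maxc:
--             if winner is None and k is not None:
--                 winner = k
--     return winner, counts
-- ===== SOURCE B (Python) =====
-- def _is_nullish(v) -> bool:
--     if v is None: return True
--     s = str(v).strip().lower()
--     return s in ("", "null", "none", "na", "sin prediccion")
--
-- def _mode_with_null(labels):
--     """Staged pipeline instead of accumulator threading: normalize every label
--     to its key up front, dedup (first occurrence), count by list.count, and
--     pick the winner as the head of a stable sort of the non-null keys by
--     descending count, accepted only if it reaches the null key's count."""
--     keys = [None if _is_nullish(lab) else str(lab).strip() for lab in labels]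
--     if not keys:
--         return None, {}
--     distinct = list(dict.fromkeys(keys))
--     counts = {k: keys.count(k) for k in distinct}
--     ranked = sorted((k for k in distinct if k is not None), key=lambda k: -keys.count(k))
--     if ranked and keys.count(ranked[0]) >= keys.count(None):
--         return ranked[0], counts
--     return None, counts
-- ===== Notes on version B (the rewrite author's own statement) =====
-- stated objective: alternative
-- what changed: A's incremental count-dict plus winner/maxc accumulator scan is replaced by a staged pipeline: normalize all labels to keys up front, dedup with dict.fromkeys, count each distinct key with list.count, and pick the winner as the head of a stable sort of the non-null keys by descending count, accepted only if its count reaches the null key's count.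
import Mathlib
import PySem

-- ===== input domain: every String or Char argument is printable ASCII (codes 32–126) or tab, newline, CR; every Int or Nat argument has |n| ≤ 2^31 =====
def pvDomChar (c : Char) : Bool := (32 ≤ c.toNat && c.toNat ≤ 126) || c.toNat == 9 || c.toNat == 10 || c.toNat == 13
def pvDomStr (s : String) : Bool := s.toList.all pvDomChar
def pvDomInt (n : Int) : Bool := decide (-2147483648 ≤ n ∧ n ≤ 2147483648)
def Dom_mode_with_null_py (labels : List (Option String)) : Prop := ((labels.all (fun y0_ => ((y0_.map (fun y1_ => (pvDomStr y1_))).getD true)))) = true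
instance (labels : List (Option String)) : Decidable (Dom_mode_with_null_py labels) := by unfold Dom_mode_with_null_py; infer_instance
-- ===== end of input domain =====

-- B replaces A's incremental count-dict + winner/maxc accumulator scan by a staged pipeline
-- (normalize keys, dedup, count with list.count, stable sort of non-null keys by descending
-- count, head accepted if it reaches the null key's count); alternative decomposition, same result.

-- ===== PORT A =====
-- _is_nullish(v): v is None, or str(v).strip().lower() is one of the nullish strings
-- (inside _mode_with_null, v is either None or a str, so str(v) is v itself)
def pvNullish (lab : Option String) : Bool :=
  match lab with
  | none => true
  | some v =>
    let s := PySem.Str.lower (PySem.Str.strip v)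
    s == "" || s == "null" || s == "none" || s == "na" || s == "sin prediccion"

-- key = None if _is_nullish(lab) else str(lab).strip()  (lab is a str in the else branch)
def pvKey (lab : Option String) : Option String :=
  if pvNullish lab then none else lab.map PySem.Str.strip

-- A's counting loop: counts[key] = counts.get(key, 0) + 1
def pvCounts (labels : List (Option String)) : PySem.Dict (Option String) Int :=
  labels.foldl (fun d lab => d.insert (pvKey lab) (d.getD (pvKey lab) 0 + 1)) PySem.Dict.empty

def mode_with_null_py (labels : List (Option String)) : Option String × (List (Option String × Int)) :=
  let counts := pvCounts labels
  if counts.items.isEmpty then (none, [])  -- if not counts: return None, {}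
  else
    -- winner, maxc = None, -1 ; for k, c in counts.items(): …
    let wm := counts.items.foldl (fun st kc =>
        if kc.2 > st.2 then (kc.1, kc.2)
        else if kc.2 == st.2 then
          (if st.1 == (none : Option String) && !(kc.1 == (none : Option String))
           then (kc.1, st.2) else st)
        else st)
      ((none : Option String), (-1 : Int))
    (wm.1, counts.items)

-- ===== PORT B =====
def mode_with_null_py_alt (labels : List (Option String)) : Option String × (List (Option String × Int)) :=
  let keys := labels.map pvKey                 -- [None if _is_nullish(lab) else str(lab).strip() for lab in labels]
  if keys.isEmpty then (none, [])              -- if not keys: return None, {}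
  else
    let distinct := PySem.List.dedup keys      -- list(dict.fromkeys(keys))
    -- counts = {k: keys.count(k) for k in distinct}
    let counts := distinct.foldl (fun d k => d.insert k ((keys.count k : Int))) PySem.Dict.empty
    -- ranked = sorted((k for k in distinct if k is not None), key=lambda k: -keys.count(k))
    let ranked := PySem.List.sorted (distinct.filter (fun k => k.isSome))
                    (fun k => -((keys.count k : Int))) false
    match ranked with                          -- if ranked and keys.count(ranked[0]) >= keys.count(None): …
    | [] => (none, counts.items)
    | r :: _ =>
      if (keys.count (none : Option String) : Int) ≤ (keys.count r : Int)
      then (r, counts.items) else (none, counts.items)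

-- ===== PRECONDITION & SPEC =====
def Spec_mode_with_null_py (labels : List (Option String)) (out : Option String × (List (Option String × Int))) : Prop := out = mode_with_null_py_alt labels
instance (labels : List (Option String)) (out : Option String × (List (Option String × Int))) : Decidable (Spec_mode_with_null_py labels out) := by unfold Spec_mode_with_null_py; infer_instance

-- ===== CLAIM (what is proved, stated in full; the proofs are below) =====
def Claim_equal_mode_with_null_py : Prop := ∀ (labels : List (Option String)), Dom_mode_with_null_py labels → Spec_mode_with_null_py labels (mode_with_null_py labels)

-- ===== LEMMAS AND PROOFS =====

-- A's loop body, as a two-argument function on the (winner, maxc) state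
def pvStepA (st kc : Option String × Int) : Option String × Int :=
  if kc.2 > st.2 then (kc.1, kc.2)
  else if kc.2 == st.2 then
    (if st.1 == (none : Option String) && !(kc.1 == (none : Option String))
     then (kc.1, st.2) else st)
  else st

-- the count of the null key over a prefix P of the distinct keys
def pvNoneCnt (cnt : Option String → Int) (P : List (Option String)) : Int :=
  if (none : Option String) ∈ P then cnt none else 0

-- B's winner, phrased over a prefix P of the distinct keys
def pvBWin (cnt : Option String → Int) (P : List (Option String)) : Option String :=
  match PySem.List.min? (P.filter (fun k => k.isSome)) (fun k => -(cnt k)) with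
  | none => none
  | some r => if pvNoneCnt cnt P ≤ cnt r then r else none

-- A's running maximum count over a prefix P
def pvM (cnt : Option String → Int) (P : List (Option String)) : Int :=
  P.foldl (fun a k => max a (cnt k)) (-1)

theorem pvM_append (cnt : Option String → Int) (P : List (Option String)) (k : Option String) :
    pvM cnt (P ++ [k]) = max (pvM cnt P) (cnt k) := by
  simp [pvM]

theorem pvM_le (cnt : Option String → Int) (P : List (Option String)) :
    (-1 ≤ pvM cnt P) ∧ ∀ j ∈ P, cnt j ≤ pvM cnt P :=
  PySem.List.le_foldl_max_int P cnt (-1)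

theorem pvM_mem (cnt : Option String → Int) (P : List (Option String)) :
    pvM cnt P = -1 ∨ ∃ j ∈ P, cnt j = pvM cnt P := by
  have h : pvM cnt P = (P.map cnt).foldl max (-1) := by
    simp [pvM, List.foldl_map]
  rw [h]
  rcases PySem.List.foldl_max_mem (P.map cnt) (-1) with h1 | h1
  · exact Or.inl h1
  · rcases List.mem_map.mp h1 with ⟨j, hj, hje⟩
    exact Or.inr ⟨j, hj, hje⟩

-- min? over an appended element is one fold step
theorem pv_min?_append_none (xs : List (Option String)) (key : Option String → Int)
    (x : Option String) (h : PySem.List.min? xs key = none) :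
    PySem.List.min? (xs ++ [x]) key = some x := by
  unfold PySem.List.min? at h ⊢
  rw [List.foldl_append, h]
  rfl

theorem pv_min?_append_some (xs : List (Option String)) (key : Option String → Int)
    (x m : Option String) (h : PySem.List.min? xs key = some m) :
    PySem.List.min? (xs ++ [x]) key = some (if key x < key m then x else m) := by
  unfold PySem.List.min? at h ⊢
  rw [List.foldl_append, h]
  simp only [List.foldl_cons, List.foldl_nil]
  by_cases hc : key x < key m
  · rw [if_pos hc, if_pos hc]
  · rw [if_neg hc, if_neg hc]

-- the head of a stable sort is the first element with minimal key
theorem pv_head_sorted (xs : List (Option String)) (key : Option String → Int) :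
    (PySem.List.sorted xs key false).head? = PySem.List.min? xs key := by
  induction xs using List.reverseRecOn with
  | nil => rfl
  | append_singleton xs x ih =>
    rw [PySem.List.sorted_eq_foldl_insertBy] at ih ⊢
    rw [List.foldl_append, List.foldl_cons, List.foldl_nil]
    rcases hs : List.foldl (fun acc y =>
        PySem.List.insertBy (fun a b => decide (key a < key b)) y acc) [] xs with _ | ⟨y, ys⟩
    · -- sorted xs = [] → xs = [] → min? xs = none
      have hxs : xs = [] := by
        have := (PySem.List.sorted_eq_nil_iff xs key false).mp
          (by rw [PySem.List.sorted_eq_foldl_insertBy]; exact hs)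
        exact this
      subst hxs
      rfl
    · rw [hs] at ih
      simp only [List.head?_cons] at ih
      rw [pv_min?_append_some xs key x y ih.symm]
      simp only [PySem.List.insertBy]
      by_cases h : key x < key y
      · rw [if_pos (by simpa using h), if_pos h]
        rfl
      · rw [if_neg (by simpa using h), if_neg h]
        rfl

-- the core invariant: A's accumulator state over a distinct prefix P is (B's winner over P, the running max)
theorem pvInv (cnt : Option String → Int) (P : List (Option String))
    (hnd : P.Nodup) (h1 : ∀ j ∈ P, 1 ≤ cnt j) :
    (P.map (fun k => (k, cnt k))).foldl pvStepA ((none : Option String), (-1 : Int))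
      = (pvBWin cnt P, pvM cnt P) := by
  induction P using List.reverseRecOn with
  | nil => rfl
  | append_singleton P k ih =>
    have hndP : P.Nodup := (List.nodup_append.mp hnd).1
    have hkP : k ∉ P := by
      have h2 : ∀ a ∈ P, ¬ a = k := by simpa using (List.nodup_append.mp hnd).2.2
      exact fun hm => h2 k hm rfl
    have h1P : ∀ j ∈ P, 1 ≤ cnt j := fun j hj => h1 j (List.mem_append_left _ hj)
    have hk1 : 1 ≤ cnt k := h1 k (List.mem_append_right _ (List.mem_singleton_self k))
    rw [List.map_append, List.foldl_append, ih hndP h1P]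
    simp only [List.map_cons, List.map_nil, List.foldl_cons, List.foldl_nil]
    rw [pvM_append]
    have hcle : ∀ j ∈ P, cnt j ≤ pvM cnt P := (pvM_le cnt P).2
    have hminr : ∀ r, PySem.List.min? (P.filter (fun j => j.isSome)) (fun j => -(cnt j)) = some r →
        r ∈ P ∧ r.isSome = true ∧ ∀ j ∈ P, j.isSome = true → cnt j ≤ cnt r := by
      intro r hr
      have hrmem := PySem.List.min?_mem hr
      have hrP := List.mem_filter.mp hrmem
      refine ⟨hrP.1, by simpa using hrP.2, ?_⟩
      intro j hj hjs
      have := PySem.List.min?_isMin hr j (List.mem_filter.mpr ⟨hj, by simpa using hjs⟩)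
      omega
    rcases hnone : (k : Option String) with _ | kv
    · -- k is the null key: the filtered list is unchanged, noneCnt becomes cnt none
      subst hnone
      have hnP : (none : Option String) ∉ P := hkP
      have hncP : pvNoneCnt cnt P = 0 := by simp [pvNoneCnt, hnP]
      have hncP' : pvNoneCnt cnt (P ++ [none]) = cnt none := by simp [pvNoneCnt]
      have hPfilter : (P ++ [(none : Option String)]).filter (fun j => j.isSome)
          = P.filter (fun j => j.isSome) := by simp [List.filter_append]
      rcases hmin : PySem.List.min? (P.filter (fun j => j.isSome)) (fun j => -(cnt j)) with _ | r
      · -- no non-null key at all: both winners are none throughout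
        have hBP : pvBWin cnt P = none := by unfold pvBWin; rw [hmin]
        have hBPk : pvBWin cnt (P ++ [none]) = none := by
          unfold pvBWin; rw [hPfilter, hmin]
        rw [hBP, hBPk]
        simp only [pvStepA]
        by_cases hgt : cnt none > pvM cnt P
        · simp [hgt, max_eq_right hgt.le]
        · by_cases heq : cnt none = pvM cnt P
          · simp [heq]
          · have hm : max (pvM cnt P) (cnt none) = pvM cnt P := max_eq_left (by omega)
            simp [hgt, heq, hm]
      · obtain ⟨hrP, hrs, hrmax⟩ := hminr r hmin
        obtain ⟨rv, rfl⟩ := Option.isSome_iff_exists.mp hrs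
        have hrcnt : 1 ≤ cnt (some rv) := h1P _ hrP
        have hrM : cnt (some rv) ≤ pvM cnt P := hcle _ hrP
        have hM1 : 1 ≤ pvM cnt P := le_trans hrcnt hrM
        have hattain : ∃ j ∈ P, cnt j = pvM cnt P := by
          rcases pvM_mem cnt P with h | h
          · omega
          · exact h
        have hBP : pvBWin cnt P = some rv := by
          unfold pvBWin; rw [hmin, hncP]
          simp only []
          rw [if_pos (by omega)]
        have hBPk : pvBWin cnt (P ++ [none])
            = if cnt none ≤ cnt (some rv) then some rv else none := by
          unfold pvBWin; rw [hPfilter, hmin, hncP']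
        rw [hBP, hBPk]
        have hrtop : ∀ j ∈ P, cnt j ≤ cnt (some rv) ∨ j = none := by
          intro j hj
          rcases j with _ | jv
          · exact Or.inr rfl
          · exact Or.inl (hrmax _ hj rfl)
        have hMr : pvM cnt P ≤ cnt (some rv) := by
          obtain ⟨j, hj, hje⟩ := hattain
          rcases hrtop j hj with h | h
          · omega
          · exact absurd (h ▸ hj) hnP
        simp only [pvStepA]
        by_cases hgt : cnt none > pvM cnt P
        · rw [if_pos (by simpa using hgt), if_neg (by omega : ¬ cnt none ≤ cnt (some rv)),
            max_eq_right hgt.le]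
        · have hle : cnt none ≤ cnt (some rv) := by omega
          rw [if_neg (by simpa using hgt), if_pos hle, max_eq_left (by omega)]
          by_cases heq : cnt none = pvM cnt P
          · rw [if_pos (by simpa using heq)]
            simp
          · rw [if_neg (by simpa using heq)]
    · -- k = some kv is non-null: the filtered list gains k, noneCnt is unchanged
      subst hnone
      have hncP' : pvNoneCnt cnt (P ++ [some kv]) = pvNoneCnt cnt P := by
        unfold pvNoneCnt; simp
      have hPfilter : (P ++ [(some kv : Option String)]).filter (fun j => j.isSome)
          = P.filter (fun j => j.isSome) ++ [some kv] := by simp [List.filter_append]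
      rcases hmin : PySem.List.min? (P.filter (fun j => j.isSome)) (fun j => -(cnt j)) with _ | r
      · -- no non-null key in P: since P is distinct, P = [] or P = [none]
        have hallnone : ∀ j ∈ P, j = none := by
          intro j hj
          rcases hjs : j with _ | jv
          · rfl
          · exfalso
            have hjf : j ∈ P.filter (fun j => j.isSome) :=
              List.mem_filter.mpr ⟨hj, by simp [hjs]⟩
            rw [PySem.List.min?_eq_none_iff] at hmin
            rw [hmin] at hjf
            exact List.not_mem_nil hjf
        have hBP : pvBWin cnt P = none := by unfold pvBWin; rw [hmin]
        have hBPk : pvBWin cnt (P ++ [some kv])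
            = if pvNoneCnt cnt P ≤ cnt (some kv) then some kv else none := by
          unfold pvBWin
          rw [hPfilter, pv_min?_append_none _ _ _ hmin]
          simp only [hncP']
        rw [hBP, hBPk]
        have hPcases : P = [] ∨ P = [(none : Option String)] := by
          rcases hP : P with _ | ⟨p, ps⟩
          · exact Or.inl rfl
          · right
            have hp : p = none := hallnone p (hP ▸ List.mem_cons_self)
            rcases hps : ps with _ | ⟨q, qs⟩
            · rw [hp]
            · exfalso
              have hq : q = none := hallnone q (by rw [hP, hps]; simp)
              rw [hP, hps, hp, hq] at hndP
              simp at hndP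
        simp only [pvStepA]
        rcases hPcases with hP | hP
        · subst hP
          have hM : pvM cnt [] = -1 := rfl
          have hN : pvNoneCnt cnt ([] : List (Option String)) = 0 := by simp [pvNoneCnt]
          rw [hM, hN]
          rw [if_pos (by simpa using (by omega : cnt (some kv) > (-1 : Int))),
            if_pos (by omega), max_eq_right (by omega)]
        · subst hP
          have hM : pvM cnt [(none : Option String)] = cnt none := by
            have h0 : 1 ≤ cnt (none : Option String) := h1P _ List.mem_cons_self
            simp only [pvM, List.foldl_cons, List.foldl_nil]
            omega
          have hN : pvNoneCnt cnt [(none : Option String)] = cnt none := by simp [pvNoneCnt]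
          rw [hM, hN]
          by_cases hgt : cnt (some kv) > cnt none
          · rw [if_pos (by simpa using hgt),
              if_pos (show cnt none ≤ cnt (some kv) by omega), max_eq_right hgt.le]
          · by_cases heq : cnt (some kv) = cnt none
            · rw [if_neg (by simpa using hgt), if_pos (by simpa using heq)]
              rw [if_pos (show cnt none ≤ cnt (some kv) by omega),
                max_eq_left (show cnt (some kv) ≤ cnt none by omega)]
              simp
            · rw [if_neg (by simpa using hgt), if_neg (by simpa using heq)]
              rw [if_neg (show ¬ cnt none ≤ cnt (some kv) by omega),
                max_eq_left (show cnt (some kv) ≤ cnt none by omega)]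
      · -- P has a non-null champion r
        obtain ⟨hrP, hrs, hrmax⟩ := hminr r hmin
        obtain ⟨rv, rfl⟩ := Option.isSome_iff_exists.mp hrs
        have hrcnt : 1 ≤ cnt (some rv) := h1P _ hrP
        have hrM : cnt (some rv) ≤ pvM cnt P := hcle _ hrP
        have hM1 : 1 ≤ pvM cnt P := le_trans hrcnt hrM
        have hattain : ∃ j ∈ P, cnt j = pvM cnt P := by
          rcases pvM_mem cnt P with h | h
          · omega
          · exact h
        have hNle : pvNoneCnt cnt P ≤ pvM cnt P := by
          unfold pvNoneCnt
          split
          · exact hcle _ ‹_›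
          · omega
        -- if the non-null champion reaches noneCnt it attains the global max;
        -- otherwise the null key attains it
        have hFactW : pvNoneCnt cnt P ≤ cnt (some rv) → cnt (some rv) = pvM cnt P := by
          intro hc
          obtain ⟨j, hj, hje⟩ := hattain
          rcases hjs : j with _ | jv
          · have : pvNoneCnt cnt P = cnt none := by
              unfold pvNoneCnt; rw [if_pos (hjs ▸ hj)]
            rw [hjs] at hje
            omega
          · have := hrmax j hj (by simp [hjs])
            rw [hjs] at this hje
            omega
        have hFactN : ¬ pvNoneCnt cnt P ≤ cnt (some rv) → pvNoneCnt cnt P = pvM cnt P := by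
          intro hc
          obtain ⟨j, hj, hje⟩ := hattain
          rcases hjs : j with _ | jv
          · have : pvNoneCnt cnt P = cnt none := by
              unfold pvNoneCnt; rw [if_pos (hjs ▸ hj)]
            rw [hjs] at hje
            omega
          · have := hrmax j hj (by simp [hjs])
            rw [hjs] at this hje
            omega
        have hBP : pvBWin cnt P
            = if pvNoneCnt cnt P ≤ cnt (some rv) then some rv else none := by
          unfold pvBWin; rw [hmin]
        have hBPk : pvBWin cnt (P ++ [some kv])
            = if pvNoneCnt cnt P ≤ cnt (if cnt (some rv) < cnt (some kv) then some kv else some rv)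
              then (if cnt (some rv) < cnt (some kv) then (some kv : Option String) else some rv)
              else none := by
          have hsel : (if (fun j => -(cnt j)) (some kv : Option String) < (fun j => -(cnt j)) (some rv) then (some kv : Option String) else some rv)
              = (if cnt (some rv) < cnt (some kv) then (some kv : Option String) else some rv) := by
            simp only []
            by_cases h : cnt (some rv) < cnt (some kv)
            · rw [if_pos (by omega), if_pos h]
            · rw [if_neg (by omega), if_neg h]
          unfold pvBWin
          rw [hPfilter, pv_min?_append_some _ _ _ _ hmin, hsel]
          simp only [hncP']
        by_cases hcr : cnt (some rv) < cnt (some kv)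
        · -- the appended non-null key strictly beats the old non-null champion
          rw [if_pos hcr] at hBPk
          rw [hBP, hBPk]
          by_cases hgt : cnt (some kv) > pvM cnt P
          · have hNck : pvNoneCnt cnt P ≤ cnt (some kv) := by omega
            simp [pvStepA, hgt, hNck, max_eq_right hgt.le]
          · by_cases hN : pvNoneCnt cnt P ≤ cnt (some rv)
            · exfalso
              have := hFactW hN
              omega
            · have hNM := hFactN hN
              rw [if_neg hN]
              have hle : cnt (some kv) ≤ pvM cnt P := by omega
              by_cases heq : cnt (some kv) = pvM cnt P
              · rw [if_pos (show pvNoneCnt cnt P ≤ cnt (some kv) by omega)]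
                simp [pvStepA, heq]
              · rw [if_neg (show ¬ pvNoneCnt cnt P ≤ cnt (some kv) by omega)]
                simp [pvStepA, hgt, heq, max_eq_left hle]
        · -- the old non-null champion survives; the winner is unchanged
          rw [if_neg hcr] at hBPk
          rw [hBP, hBPk]
          have hck : cnt (some kv) ≤ cnt (some rv) := by omega
          have hgt : ¬ (cnt (some kv) > pvM cnt P) := by omega
          by_cases hN : pvNoneCnt cnt P ≤ cnt (some rv)
          · have hWtop := hFactW hN
            rw [if_pos hN]
            have hle : cnt (some kv) ≤ pvM cnt P := by omega
            by_cases heq : cnt (some kv) = pvM cnt P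
            · simp [pvStepA, heq]
            · simp [pvStepA, hgt, heq, max_eq_left hle]
          · have hNM := hFactN hN
            rw [if_neg hN]
            have hle : cnt (some kv) ≤ pvM cnt P := by omega
            by_cases heq : cnt (some kv) = pvM cnt P
            · exfalso
              omega
            · simp [pvStepA, hgt, heq, max_eq_left hle]

-- A's counts dict is Counter(keys)
theorem pv_counts_eq_counter (labels : List (Option String)) :
    pvCounts labels = PySem.Dict.counter (labels.map pvKey) := by
  rw [← PySem.Dict.foldl_insert_getD_add_one_eq_counter, List.foldl_map]
  rfl

-- the count function induced by the normalized key list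
def pvCntOf (keys : List (Option String)) : Option String → Int := fun k => (keys.count k : Int)

-- ===== VERDICT (by name: the statement is the Claim_ definition above) =====
theorem mode_with_null_py_spec : Claim_equal_mode_with_null_py := by
  intro labels _
  unfold Spec_mode_with_null_py mode_with_null_py mode_with_null_py_alt
  rcases hkeys : labels.map pvKey with _ | ⟨k0, krest⟩
  · -- empty input: both return (none, [])
    have : labels = [] := List.map_eq_nil_iff.mp hkeys
    subst this
    rfl
  · set keys := labels.map pvKey with hkeysdef
    rw [← hkeys]
    have hne : keys ≠ [] := by rw [hkeys]; exact List.cons_ne_nil _ _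
    set D := PySem.List.dedup keys with hD
    have hDnodup : D.Nodup := by
      rw [hD, PySem.List.dedup_eq_ofList]
      exact PySem.Set.nodup_ofList keys
    have hD1 : ∀ j ∈ D, 1 ≤ pvCntOf keys j := by
      intro j hj
      have hjk : j ∈ keys := (PySem.List.mem_dedup keys j).mp hj
      have := List.count_pos_iff.mpr hjk
      simp only [pvCntOf]
      omega
    -- A's items are the distinct keys paired with their counts
    have hitems : (pvCounts labels).items = D.map (fun k => (k, pvCntOf keys k)) := by
      rw [pv_counts_eq_counter, PySem.Dict.items_counter, hD, PySem.List.dedup_eq_ofList]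
      rfl
    -- B's dict has the same items
    have hitemsB : (D.foldl (fun d k => d.insert k ((keys.count k : Int))) PySem.Dict.empty).items
        = D.map (fun k => (k, pvCntOf keys k)) := by
      rw [PySem.Dict.items_foldl_insert_fresh (k := fun x => x) (v := fun x => ((keys.count x : Int)))
        (d := PySem.Dict.empty) (l := D)
        (by intro a _; exact PySem.Dict.contains_empty a) (by simpa using hDnodup)]
      rfl
    have hDne : D ≠ [] := by
      intro h
      have hk0 : k0 ∈ keys := by rw [hkeys]; exact List.mem_cons_self
      have := (PySem.List.mem_dedup keys k0).mpr hk0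
      rw [← hD] at this
      rw [h] at this
      exact List.not_mem_nil this
    simp only [hitems]
    have hAne : ¬ (D.map (fun k => (k, pvCntOf keys k))).isEmpty = true := by
      simp [List.isEmpty_iff, hDne]
    have hBne : ¬ keys.isEmpty = true := by simp [List.isEmpty_iff, hne]
    rw [if_neg hAne, if_neg hBne]
    have hfold : (D.map (fun k => (k, pvCntOf keys k))).foldl (fun st kc =>
        if kc.2 > st.2 then (kc.1, kc.2)
        else if kc.2 == st.2 then
          (if st.1 == (none : Option String) && !(kc.1 == (none : Option String))
           then (kc.1, st.2) else st)
        else st) ((none : Option String), (-1 : Int))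
        = (pvBWin (pvCntOf keys) D, pvM (pvCntOf keys) D) := by
      show (D.map (fun k => (k, pvCntOf keys k))).foldl pvStepA
        ((none : Option String), (-1 : Int)) = _
      exact pvInv (pvCntOf keys) D hDnodup hD1
    rw [hfold]
    have hhead := pv_head_sorted (D.filter (fun k => k.isSome)) (fun k => -(pvCntOf keys k))
    rcases hsort : PySem.List.sorted (D.filter (fun k => k.isSome))
        (fun k => -((keys.count k : Int))) false with _ | ⟨r, rs⟩
    · -- no non-null key: B returns none, and so does pvBWin
      have hm : PySem.List.min? (D.filter (fun k => k.isSome)) (fun k => -(pvCntOf keys k)) = none := by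
        rw [← hhead]
        rw [show PySem.List.sorted (D.filter (fun k => k.isSome))
          (fun k => -(pvCntOf keys k)) false = [] from hsort]
        rfl
      unfold pvBWin
      rw [hm]
      rw [← hD, hitemsB]
    · have hmin : PySem.List.min? (D.filter (fun k => k.isSome)) (fun k => -(pvCntOf keys k))
          = some r := by
        rw [← hhead]
        rw [show PySem.List.sorted (D.filter (fun k => k.isSome))
          (fun k => -(pvCntOf keys k)) false = r :: rs from hsort]
        rfl
      have hnoneCnt : pvNoneCnt (pvCntOf keys) D = (keys.count (none : Option String) : Int) := by
        unfold pvNoneCnt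
        split
        · rfl
        · rename_i h
          have hnk : (none : Option String) ∉ keys :=
            fun hm => h ((PySem.List.mem_dedup keys none).mpr hm)
          simp [List.count_eq_zero.mpr hnk]
      unfold pvBWin
      rw [hmin, hnoneCnt]
      rw [← hD, hitemsB]
      simp only []
      by_cases hc : (keys.count (none : Option String) : Int) ≤ pvCntOf keys r
      · rw [if_pos hc,
          if_pos (show (keys.count (none : Option String) : Int) ≤ (keys.count r : Int) from hc)]
      · rw [if_neg hc,
          if_neg (show ¬ (keys.count (none : Option String) : Int) ≤ (keys.count r : Int) from hc)]
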